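-- pv_equiv track=rewrite | github.com/suryansh-raven-dev/ux-context | chatbot/scripts/precise_coords.py | group_text_rows
-- ===== SOURCE A (Python) =====
-- def group_text_rows(rows, gap=5):
--     """Group consecutive rows into text blocks."""
--     if not rows:
--         return []
--     groups = []
--     current = [rows[0]]
--     for r in rows[1:]:
--         if r[0] - current[-1][0] <= gap:
--             current.append(r)
--         else:
--             y_start = current[0][0]
--             y_end = current[-1][0]
--             x_min = min(r[1] for r in current)
--             x_max = max(r[2] for r in current)
--             groups.append((y_start, y_end, x_min, x_max))
--             current = [r]
--     y_start = current[0][0]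
--     y_end = current[-1][0]
--     x_min = min(r[1] for r in current)
--     x_max = max(r[2] for r in current)
--     groups.append((y_start, y_end, x_min, x_max))
--     return groups
-- ===== SOURCE B (Python) =====
-- def group_text_rows(rows, gap=5):
--     """Group consecutive rows into text blocks (single pass, running stats)."""
--     out = []
--     st = None  # (y_start, prev_y, running_x_min, running_x_max)
--     for y, x1, x2 in rows:
--         if st is None:
--             st = (y, y, x1, x2)
--         elif y - st[1] > gap:
--             out.append(st)
--             st = (y, y, x1, x2)
--         else:
--             st = (st[0], y, min(st[2], x1), max(st[3], x2))
--     if st is not None: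
--         out.append(st)
--     return out
-- ===== Notes on version B (the rewrite author's own statement) =====
-- stated objective: alternative
-- what changed: B replaces A's buffered grouping (store each group as a list, then re-scan it for min/max at every flush) with a single pass that keeps only a 4-tuple accumulator (y_start, prev_y, running x_min, running x_max), so no group list is ever materialized or re-scanned.
import Mathlib
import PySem

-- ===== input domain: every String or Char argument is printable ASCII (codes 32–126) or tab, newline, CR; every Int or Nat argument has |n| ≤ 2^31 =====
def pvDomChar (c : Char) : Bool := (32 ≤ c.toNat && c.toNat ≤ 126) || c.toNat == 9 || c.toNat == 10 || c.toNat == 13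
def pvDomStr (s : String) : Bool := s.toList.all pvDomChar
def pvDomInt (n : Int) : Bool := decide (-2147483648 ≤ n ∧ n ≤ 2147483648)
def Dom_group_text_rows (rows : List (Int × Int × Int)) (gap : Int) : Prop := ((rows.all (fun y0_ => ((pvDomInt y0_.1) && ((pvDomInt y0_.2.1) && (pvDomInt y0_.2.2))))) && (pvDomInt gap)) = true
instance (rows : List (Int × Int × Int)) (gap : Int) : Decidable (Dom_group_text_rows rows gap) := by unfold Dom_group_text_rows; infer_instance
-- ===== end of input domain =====

-- B replaces A's buffered grouping (materialize each group, re-scan it for min/max on flush)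
-- with a single pass keeping only a running (y_start, prev_y, x_min, x_max) accumulator.


-- ===== PORT A =====
-- current[-1][0] of the nonempty buffer c :: cs
def pvLastY (c : Int × Int × Int) (cs : List (Int × Int × Int)) : Int :=
  match cs with
  | [] => c.1
  | d :: ds => pvLastY d ds

-- (y_start, y_end, x_min, x_max) of the nonempty buffer c :: cs;
-- Python's min/max over the generators, ported as folds (exact for nonempty lists).
def pvSummary (c : Int × Int × Int) (cs : List (Int × Int × Int)) : Int × Int × Int × Int :=
  (c.1, pvLastY c cs,
   cs.foldl (fun m r => min m r.2.1) c.2.1,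
   cs.foldl (fun m r => max m r.2.2) c.2.2)

-- the loop over rows[1:], carrying the buffer (c :: cs) and accumulated groups
def pvGoA (gap : Int) (rs : List (Int × Int × Int)) (c : Int × Int × Int)
    (cs : List (Int × Int × Int)) (groups : List (Int × Int × Int × Int)) :
    List (Int × Int × Int × Int) :=
  match rs with
  | [] => groups ++ [pvSummary c cs]
  | r :: rest =>
    if r.1 - pvLastY c cs ≤ gap then
      pvGoA gap rest c (cs ++ [r]) groups
    else
      pvGoA gap rest r [] (groups ++ [pvSummary c cs])

def group_text_rows (rows : List (Int × Int × Int)) (gap : Int) : List (Int × Int × Int × Int) :=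
  match rows with
  | [] => []
  | r :: rest => pvGoA gap rest r [] []

-- ===== PORT B =====
-- single pass: st = some (y_start, prev_y, running x_min, running x_max)
def pvGoB (gap : Int) (rs : List (Int × Int × Int))
    (st : Option (Int × Int × Int × Int)) (out : List (Int × Int × Int × Int)) :
    List (Int × Int × Int × Int) :=
  match rs with
  | [] =>
    match st with
    | none => out
    | some s => out ++ [s]
  | (y, x1, x2) :: rest =>
    match st with
    | none => pvGoB gap rest (some (y, y, x1, x2)) out
    | some s =>
      if y - s.2.1 > gap then
        pvGoB gap rest (some (y, y, x1, x2)) (out ++ [s])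
      else
        pvGoB gap rest (some (s.1, y, min s.2.2.1 x1, max s.2.2.2 x2)) out

def group_text_rows_alt (rows : List (Int × Int × Int)) (gap : Int) : List (Int × Int × Int × Int) :=
  pvGoB gap rows none []

-- ===== PRECONDITION & SPEC =====
def Spec_group_text_rows (rows : List (Int × Int × Int)) (gap : Int) (out : List (Int × Int × Int × Int)) : Prop := out = group_text_rows_alt rows gap
instance (rows : List (Int × Int × Int)) (gap : Int) (out : List (Int × Int × Int × Int)) : Decidable (Spec_group_text_rows rows gap out) := by unfold Spec_group_text_rows; infer_instance

-- ===== CLAIM (what is proved, stated in full; the proofs are below) =====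
def Claim_equal_group_text_rows : Prop := ∀ (rows : List (Int × Int × Int)) (gap : Int), Dom_group_text_rows rows gap → Spec_group_text_rows rows gap (group_text_rows rows gap)

-- ===== LEMMAS AND PROOFS =====

theorem pvLastY_concat (c r : Int × Int × Int) (cs : List (Int × Int × Int)) :
    pvLastY c (cs ++ [r]) = r.1 := by
  induction cs generalizing c with
  | nil => rfl
  | cons d ds ih => simpa [pvLastY] using ih d

theorem pvGoA_eq_pvGoB (gap : Int) (rs : List (Int × Int × Int)) :
    ∀ (c : Int × Int × Int) (cs : List (Int × Int × Int)) (groups : List (Int × Int × Int × Int)),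
    pvGoA gap rs c cs groups =
      pvGoB gap rs (some (c.1, pvLastY c cs,
        cs.foldl (fun m r => min m r.2.1) c.2.1,
        cs.foldl (fun m r => max m r.2.2) c.2.2)) groups := by
  induction rs with
  | nil => intro c cs groups; rfl
  | cons r rest ih =>
    intro c cs groups
    obtain ⟨y, x1, x2⟩ := r
    by_cases h : y - pvLastY c cs ≤ gap
    · have h' : ¬ (y - pvLastY c cs > gap) := by omega
      simp only [pvGoA, pvGoB, h, h', if_pos, if_neg, not_false_iff]
      rw [ih c (cs ++ [(y, x1, x2)]) groups]
      simp [pvLastY_concat]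
    · have h' : y - pvLastY c cs > gap := by omega
      simp only [pvGoA, pvGoB, h, h', if_neg, if_pos, not_false_iff]
      rw [ih (y, x1, x2) [] (groups ++ [pvSummary c cs])]
      simp [pvLastY, pvSummary]

-- ===== VERDICT (by name: the statement is the Claim_ definition above) =====
theorem group_text_rows_spec : Claim_equal_group_text_rows := by
  intro rows gap _
  unfold Spec_group_text_rows group_text_rows group_text_rows_alt
  match rows with
  | [] => rfl
  | r :: rest =>
    obtain ⟨y, x1, x2⟩ := r
    simpa [pvGoB, pvLastY] using pvGoA_eq_pvGoB gap rest (y, x1, x2) [] []
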